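-- pv_equiv track=rewrite | github.com/manhitv/codesignal | Challenges.py | graphEdges
-- ===== SOURCE A (Python) =====
-- def graphEdges(matrix):
--     l = []
--     for i in range(len(matrix)):
--         if [matrix[i][0], matrix[i][-1]] not in l:
--             l.append([matrix[i][0], matrix[i][-1]])
--     if len(l) == 1:
--         return 0
--     return len(l)
-- ===== SOURCE B (Python) =====
-- def graphEdges(matrix):
--     pairs = sorted((row[0], row[-1]) for row in matrix)
--     count = 0
--     prev = None
--     for p in pairs:
--         if p != prev:
--             count += 1
--         prev = p
--     return 0 if count == 1 else count
-- ===== Notes on version B (the rewrite author's own statement) =====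
-- stated objective: alternative
-- what changed: A deduplicates with a nested membership scan over a growing list; B sorts the first/last pairs once and counts distinct pairs in a single adjacent-difference scan (keeping A's count==1 -> 0 rule).
-- outside the precondition, e.g. on graphEdges([[1, 2], []]): A raises IndexError, B raises IndexError
import Mathlib
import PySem

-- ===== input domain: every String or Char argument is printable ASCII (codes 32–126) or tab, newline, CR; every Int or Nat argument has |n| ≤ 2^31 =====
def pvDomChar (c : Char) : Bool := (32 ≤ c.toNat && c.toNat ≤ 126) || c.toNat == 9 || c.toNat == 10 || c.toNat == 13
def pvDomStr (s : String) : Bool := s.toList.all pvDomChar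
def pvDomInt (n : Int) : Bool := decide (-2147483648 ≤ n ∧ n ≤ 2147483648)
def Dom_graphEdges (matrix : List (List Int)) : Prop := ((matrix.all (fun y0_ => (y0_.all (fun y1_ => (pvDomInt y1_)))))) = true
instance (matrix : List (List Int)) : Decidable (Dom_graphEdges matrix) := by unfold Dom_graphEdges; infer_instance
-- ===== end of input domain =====

-- B replaces A's quadratic membership-scan dedup by sort-then-adjacent-scan counting (alternative decomposition, same return value).

-- ===== PORT A =====
-- literal transliteration of A: the 2-element Python list [row[0], row[-1]] is represented as a pair (Int × Int)
def graphEdges (matrix : List (List Int)) : Int :=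
  let l := (PySem.List.pyRange 0 (matrix.length : Int) 1).foldl
    (fun (l : List (Int × Int)) i =>
      let row := PySem.List.pyGetD matrix i []
      let p := (PySem.List.pyGetD row 0 0, PySem.List.pyGetD row (-1) 0)
      if p ∈ l then l else l ++ [p]) []
  if l.length = 1 then 0 else (l.length : Int)

-- ===== PORT B =====
-- sorted(...) on Python tuples is lexicographic: key sends a pair into Int ×ₗ Int
def graphEdges_alt (matrix : List (List Int)) : Int :=
  let pairs := matrix.map (fun row => (PySem.List.pyGetD row 0 0, PySem.List.pyGetD row (-1) 0))
  let s := PySem.List.sorted pairs (fun p => (toLex p : Int ×ₗ Int)) false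
  let st := s.foldl (fun (st : Int × Option (Int × Int)) p =>
      (if some p ≠ st.2 then st.1 + 1 else st.1, some p)) (0, none)
  if st.1 = 1 then 0 else st.1

-- ===== PRECONDITION & SPEC =====
-- Pre_ excludes matrices containing an empty row, on which Python A raises IndexError at row[0]/row[-1]
def Pre_graphEdges (matrix : List (List Int)) : Prop := ∀ row ∈ matrix, row ≠ []
instance (matrix : List (List Int)) : Decidable (Pre_graphEdges matrix) := by unfold Pre_graphEdges; infer_instance
def pvWitness_graphEdges : List (List Int) := [[1, 2], [3], [1, 5, 2]]
def Spec_graphEdges (matrix : List (List Int)) (out : Int) : Prop := out = graphEdges_alt matrix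
instance (matrix : List (List Int)) (out : Int) : Decidable (Spec_graphEdges matrix out) := by unfold Spec_graphEdges; infer_instance

-- ===== CLAIM (what is proved, stated in full; the proofs are below) =====
def Claim_equal_graphEdges : Prop := ∀ (matrix : List (List Int)), Dom_graphEdges matrix → Pre_graphEdges matrix → Spec_graphEdges matrix (graphEdges matrix)

-- ===== LEMMAS AND PROOFS =====

-- A's accumulator: nodup, and its elements are acc's plus the processed prefix's
theorem pv_foldA (ps acc : List (Int × Int)) (h : acc.Nodup) :
    (ps.foldl (fun l p => if p ∈ l then l else l ++ [p]) acc).Nodup ∧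
    (ps.foldl (fun l p => if p ∈ l then l else l ++ [p]) acc).toFinset = acc.toFinset ∪ ps.toFinset := by
  induction ps generalizing acc with
  | nil => simp [h]
  | cons x xs ih =>
    simp only [List.foldl_cons]
    by_cases hx : x ∈ acc
    · simp only [if_pos hx]
      obtain ⟨h1, h2⟩ := ih acc h
      refine ⟨h1, ?_⟩
      rw [h2]
      ext y
      simp only [Finset.mem_union, List.mem_toFinset, List.mem_cons]
      constructor
      · rintro (h' | h')
        · exact Or.inl h'
        · exact Or.inr (Or.inr h')
      · rintro (h' | rfl | h')
        · exact Or.inl h'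
        · exact Or.inl hx
        · exact Or.inr h'
    · simp only [if_neg hx]
      have hnd : (acc ++ [x]).Nodup :=
        h.append (List.nodup_singleton x)
          (by intro a ha hb; simp only [List.mem_singleton] at hb; exact hx (hb ▸ ha))
      obtain ⟨h1, h2⟩ := ih (acc ++ [x]) hnd
      refine ⟨h1, ?_⟩
      rw [h2]
      ext y; simp

-- the card step: inserting x costs exactly one more than the x-erased card
theorem pv_card_insert (x : Int × Int) (S : Finset (Int × Int)) :
    (insert x S).card = 1 + (S.erase x).card := by
  by_cases hx : x ∈ S
  · rw [Finset.card_insert_of_mem hx, Finset.card_erase_of_mem hx]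
    have : 0 < S.card := Finset.card_pos.mpr ⟨x, hx⟩
    omega
  · rw [Finset.card_insert_of_notMem hx, Finset.erase_eq_of_notMem hx]
    omega

-- B's scan: on a sorted list whose elements all dominate prev, it adds the number of distinct elements (not equal to prev)
theorem pv_scanB (s : List (Int × Int)) (c : Int) (prev : Option (Int × Int))
    (hs : s.Pairwise (fun a b => (toLex a : Int ×ₗ Int) ≤ toLex b))
    (hp : ∀ a, prev = some a → ∀ y ∈ s, (toLex a : Int ×ₗ Int) ≤ toLex y) :
    (s.foldl (fun (st : Int × Option (Int × Int)) p =>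
        (if some p ≠ st.2 then st.1 + 1 else st.1, some p)) (c, prev)).1 =
      c + ((match prev with
            | none => s.toFinset
            | some a => s.toFinset.erase a).card : Int) := by
  induction s generalizing c prev with
  | nil => cases prev <;> simp
  | cons x xs ih =>
    have hs' := (List.pairwise_cons.mp hs).2
    have hlb : ∀ y ∈ xs, (toLex x : Int ×ₗ Int) ≤ toLex y := (List.pairwise_cons.mp hs).1
    simp only [List.foldl_cons]
    by_cases hpx : prev = some x
    · subst hpx
      have : ¬ (some x ≠ some x) := by simp
      simp only [this, if_false]
      rw [ih c (some x) hs' (by intro a ha; cases ha; exact hlb)]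
      congr 1
      norm_cast
      simp only [List.toFinset_cons]
      rw [Finset.erase_insert_eq_erase]
    · have hne : some x ≠ prev := fun h => hpx h.symm
      simp only [if_pos hne]
      rw [ih (c + 1) (some x) hs' (by intro a ha; cases ha; exact hlb)]
      have key : (match prev with
            | none => (x :: xs).toFinset
            | some a => (x :: xs).toFinset.erase a).card = 1 + (xs.toFinset.erase x).card := by
        cases prev with
        | none => simp only [List.toFinset_cons]; exact pv_card_insert x xs.toFinset
        | some a =>
          have hax : a ≠ x := by intro h; exact hpx (by rw [h])
          have hx_le_a : a ∈ xs → (toLex x : Int ×ₗ Int) ≤ toLex a := fun h => hlb a h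
          have ha_notin : a ∉ xs := by
            intro hmem
            have h1 : (toLex a : Int ×ₗ Int) ≤ toLex x := hp a rfl x (List.mem_cons_self)
            have h2 : (toLex x : Int ×ₗ Int) ≤ toLex a := hx_le_a hmem
            exact hax (toLex.injective (le_antisymm h1 h2))
          have : a ∉ (x :: xs).toFinset := by
            simp [hax, ha_notin]
          show ((x :: xs).toFinset.erase a).card = 1 + (xs.toFinset.erase x).card
          rw [Finset.erase_eq_of_notMem this]
          simp only [List.toFinset_cons]
          exact pv_card_insert x xs.toFinset
      rw [key]
      push_cast
      ring

-- ===== VERDICT (by name: the statement is the Claim_ definition above) =====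
theorem graphEdges_spec : Claim_equal_graphEdges := by
  intro matrix _ _
  unfold Spec_graphEdges graphEdges graphEdges_alt
  -- reduce A's range loop to a fold over the mapped pair list
  rw [PySem.List.foldl_pyRange_zero_pyGetD' matrix []
      (fun (l : List (Int × Int)) row =>
        if (PySem.List.pyGetD row 0 0, PySem.List.pyGetD row (-1) 0) ∈ l then l
        else l ++ [(PySem.List.pyGetD row 0 0, PySem.List.pyGetD row (-1) 0)]) []]
  rw [← List.foldl_map (f := fun row => (PySem.List.pyGetD row 0 0, PySem.List.pyGetD row (-1) 0))
      (g := fun (l : List (Int × Int)) p => if p ∈ l then l else l ++ [p]) (l := matrix) (init := ([] : List (Int × Int)))]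
  set ps := matrix.map (fun row => (PySem.List.pyGetD row 0 0, PySem.List.pyGetD row (-1) 0)) with hps
  -- A's length = number of distinct pairs
  obtain ⟨hnd, hset⟩ := pv_foldA ps [] (by simp)
  have hlenA : (ps.foldl (fun l p => if p ∈ l then l else l ++ [p]) []).length = ps.toFinset.card := by
    rw [← List.toFinset_card_of_nodup hnd, hset]; simp
  -- B's count = number of distinct pairs
  have hsorted := PySem.List.sorted_pairwise ps (fun p => (toLex p : Int ×ₗ Int))
  have hcount := pv_scanB (PySem.List.sorted ps (fun p => (toLex p : Int ×ₗ Int)) false) 0 none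
      hsorted (by intro a ha; cases ha)
  have hperm : (PySem.List.sorted ps (fun p => (toLex p : Int ×ₗ Int)) false).toFinset = ps.toFinset :=
    List.toFinset_eq_of_perm _ _ (PySem.List.sorted_perm ps (fun p => (toLex p : Int ×ₗ Int)) false)
  simp only [hperm] at hcount
  simp only [hcount, hlenA, zero_add]
  -- both return 0 iff the common card is 1
  by_cases h1 : ps.toFinset.card = 1
  · simp [h1]
  · have : ¬ ((ps.toFinset.card : Int) = 1) := by exact_mod_cast h1
    simp [h1, this]
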